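-- pv_equiv track=rewrite | github.com/sosy-lab/java-smt | scripts/traceToSmtlib.py | printBitvector
-- ===== SOURCE A (Python) =====
-- def printBitvector(width, value):
--     """Print a bitvector literal in SMTLIB format"""
--     if value < 0:
--         digits = format(-value, f'0{width}b')
--         # Convert to 2s complement
--         digits = ''.join(['0' if l == '1' else '1' for l in digits])
--         digits = format(int(digits, 2) + 1, f'0{width}b')
--     else:
--         digits = format(value, f'0{width}b')
--     return '#b' + digits
-- ===== SOURCE B (Python) =====
-- def printBitvector(width, value):
--     """Print a bitvector literal in SMTLIB format"""
--     if value < 0: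
--         # closed-form two's complement: complement-and-add-1 over L digits is (1 << L) + value
--         L = max(width, (-value).bit_length())
--         digits = format((1 << L) + value, f'0{width}b')
--     else:
--         digits = format(value, f'0{width}b')
--     return '#b' + digits
-- ===== Notes on version B (the rewrite author's own statement) =====
-- stated objective: simpler
-- what changed: The negative branch's per-character bit-flip comprehension plus reparse-and-add-1 is replaced by the closed-form two's complement (1 << max(width, (-value).bit_length())) + value, formatted once.
import Mathlib
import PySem

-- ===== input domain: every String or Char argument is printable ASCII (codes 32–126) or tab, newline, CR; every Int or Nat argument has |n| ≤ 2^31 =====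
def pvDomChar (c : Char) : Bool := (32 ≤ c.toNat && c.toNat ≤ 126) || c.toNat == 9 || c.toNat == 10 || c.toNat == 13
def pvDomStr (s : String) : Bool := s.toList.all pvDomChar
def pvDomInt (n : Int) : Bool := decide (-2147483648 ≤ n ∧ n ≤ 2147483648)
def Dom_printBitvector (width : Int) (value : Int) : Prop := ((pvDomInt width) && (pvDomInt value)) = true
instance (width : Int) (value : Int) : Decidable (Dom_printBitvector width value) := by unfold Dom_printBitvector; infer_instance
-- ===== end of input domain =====

-- B replaces A's per-character complement + reparse + add-1 with the closed-form two's complement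
-- (1 << max(width, bit_length)) + value; objective: simpler (one format call in the negative branch).

-- ===== PORT A =====
-- hand-port of `int(s, 2)` (PySem.Int.ofCharsBase?'s internals are private, which blocks the
-- equivalence proof): exact on the strings this program feeds it — nonempty runs of '0'/'1'
-- (no sign/whitespace/underscore/prefix ever reaches it); any other character = ValueError = none.
def parseBin2Go : List Char → Nat → Option Nat
  | [], acc => some acc
  | c :: r, acc =>
    if c = '0' then parseBin2Go r (2 * acc)
    else if c = '1' then parseBin2Go r (2 * acc + 1)
    else none

def pyIntBin? (cs : List Char) : Option Int :=
  if cs.isEmpty then some 0 else (parseBin2Go cs 0).map Int.ofNat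

-- format(x, f'0{width}b') for x ≥ 0: zero-padded binary digits (both Pythons call format like this;
-- for width < 0 Python raises ValueError — excluded by Pre_)
def fmt0b (x : Int) (w : Int) : List Char := PySem.Chars.zfill (PySem.Int.toBinChars x) w

def printBitvector (width : Int) (value : Int) : String :=
  if value < 0 then
    let digits := fmt0b (-value) width
    let digits := digits.map (fun l => if l = '1' then '0' else '1')
    -- int(digits, 2) cannot fail here (digits is a nonempty '0'/'1' string), hence the .getD 0
    let digits := fmt0b ((pyIntBin? digits).getD 0 + 1) width
    String.ofList ('#' :: 'b' :: digits)
  else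
    String.ofList ('#' :: 'b' :: fmt0b value width)

-- ===== PORT B =====
def printBitvector_alt (width : Int) (value : Int) : String :=
  if value < 0 then
    let L : Int := max width (PySem.Int.bitLength (-value))
    -- Python's 1 << L; here L ≥ (-value).bit_length() ≥ 1, so .toNat is exact
    let digits := fmt0b (((1 : Int) <<< L.toNat) + value) width
    String.ofList ('#' :: 'b' :: digits)
  else
    String.ofList ('#' :: 'b' :: fmt0b value width)

-- ===== PRECONDITION & SPEC =====
-- Pre_ excludes width < 0, on which both Pythons raise ValueError (f'0{width}b' is an invalid format spec).
def Pre_printBitvector (width : Int) (value : Int) : Prop := 0 ≤ width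
instance (width : Int) (value : Int) : Decidable (Pre_printBitvector width value) := by unfold Pre_printBitvector; infer_instance
def pvWitness_printBitvector : Int × Int := (8, -5)

def Spec_printBitvector (width : Int) (value : Int) (out : String) : Prop := out = printBitvector_alt width value
instance (width : Int) (value : Int) (out : String) : Decidable (Spec_printBitvector width value out) := by unfold Spec_printBitvector; infer_instance

-- ===== CLAIM (what is proved, stated in full; the proofs are below) =====
def Claim_equal_printBitvector : Prop := ∀ (width : Int) (value : Int), Dom_printBitvector width value → Pre_printBitvector width value → Spec_printBitvector width value (printBitvector width value)

-- ===== LEMMAS AND PROOFS =====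

-- value of a binary digit string, foldl from the left with accumulator
def bv (acc : Nat) (ds : List Char) : Nat :=
  ds.foldl (fun a c => 2 * a + (if c = '1' then 1 else 0)) acc

theorem bv_nil (a : Nat) : bv a [] = a := rfl

theorem bv_cons (a : Nat) (c : Char) (ds : List Char) :
    bv a (c :: ds) = bv (2 * a + (if c = '1' then 1 else 0)) ds := rfl

theorem parseBin2Go_eq (ds : List Char) (acc : Nat)
    (h : ∀ c ∈ ds, c = '0' ∨ c = '1') :
    parseBin2Go ds acc = some (bv acc ds) := by
  induction ds generalizing acc with
  | nil => rfl
  | cons c r ih =>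
    have hr : ∀ c' ∈ r, c' = '0' ∨ c' = '1' := fun c' hc' => h c' (List.mem_cons_of_mem _ hc')
    rcases h c List.mem_cons_self with hc | hc <;> subst hc <;>
      simp [parseBin2Go, bv_cons, ih _ hr]

theorem bv_acc (ds : List Char) (a : Nat) :
    bv a ds = a * 2 ^ ds.length + bv 0 ds := by
  induction ds generalizing a with
  | nil => simp [bv_nil]
  | cons c r ih =>
    rw [bv_cons, bv_cons, ih, ih (2 * 0 + _)]
    simp only [List.length_cons, pow_succ]
    ring

-- complement identity: flipping every digit of ds complements its value w.r.t. 2^len - 1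
theorem bv_flip_sum (ds : List Char) :
    bv 0 (ds.map (fun l => if l = '1' then '0' else '1')) + bv 0 ds = 2 ^ ds.length - 1 := by
  induction ds with
  | nil => rfl
  | cons c r ih =>
    have h2 : 0 < 2 ^ r.length := Nat.pow_pos (by norm_num)
    simp only [List.map_cons, bv_cons, List.length_cons]
    rw [bv_acc _ (2 * 0 + _), bv_acc r (2 * 0 + _)]
    simp only [List.length_map]
    by_cases hc : c = '1' <;> simp [hc, pow_succ] <;> omega

theorem bv_replicate_zero (p : Nat) : bv 0 (List.replicate p '0') = 0 := by
  induction p with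
  | zero => rfl
  | succ k ih => simpa [List.replicate_succ, bv_cons] using ih

-- facts about Nat.toDigits 2
theorem toDigits2_mem (m : Nat) : ∀ c ∈ Nat.toDigits 2 m, c = '0' ∨ c = '1' := by
  induction m using Nat.strong_induction_on with
  | _ m ih =>
    rw [Nat.toDigits_eq_if (by norm_num)]
    by_cases hm : m < 2
    · interval_cases m <;> simp [Nat.digitChar]
    · simp only [if_neg hm, List.mem_append, List.mem_singleton]
      intro c hc
      rcases hc with hc | hc
      · exact ih (m / 2) (Nat.div_lt_self (by omega) (by norm_num)) c hc
      · subst hc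
        have : m % 2 = 0 ∨ m % 2 = 1 := by omega
        rcases this with h | h <;> simp [h, Nat.digitChar]

theorem toDigits2_bv (m : Nat) : bv 0 (Nat.toDigits 2 m) = m := by
  induction m using Nat.strong_induction_on with
  | _ m ih =>
    rw [Nat.toDigits_eq_if (by norm_num)]
    by_cases hm : m < 2
    · interval_cases m <;> rfl
    · rw [if_neg hm]
      unfold bv
      rw [List.foldl_append]
      have hrec := ih (m / 2) (Nat.div_lt_self (by omega) (by norm_num))
      unfold bv at hrec
      rw [hrec]
      have : m % 2 = 0 ∨ m % 2 = 1 := by omega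
      rcases this with h | h
      · simp [h, Nat.digitChar]
        try omega
      · simp [h, Nat.digitChar]
        try omega

theorem toDigits2_len (m : Nat) (hm : 1 ≤ m) :
    (Nat.toDigits 2 m).length = PySem.Int.bitLength (m : Int) := by
  set k := PySem.Int.bitLength (m : Int) with hk
  have hlt : m < 2 ^ k := by
    have := PySem.Int.lt_two_pow_bitLength (m : Int)
    simpa using this
  have hk1 : 1 ≤ k := by
    by_contra h
    have : k = 0 := by omega
    rw [this] at hlt
    omega
  have hle : (Nat.toDigits 2 m).length ≤ k :=
    (Nat.length_toDigits_le_iff (by norm_num) (by omega)).mpr hlt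
  have hge : 2 ^ (k - 1) ≤ m := by
    have := PySem.Int.two_pow_bitLength_le (m : Int) (by simp; omega)
    simpa using this
  have hpos : 0 < (Nat.toDigits 2 m).length := Nat.length_toDigits_pos
  have hlt2 : m < 2 ^ (Nat.toDigits 2 m).length :=
    (Nat.length_toDigits_le_iff (by norm_num) hpos).mp le_rfl
  have : k - 1 < (Nat.toDigits 2 m).length := by
    by_contra h
    have h' : (Nat.toDigits 2 m).length ≤ k - 1 := by omega
    have := Nat.pow_le_pow_right (n := 2) (by norm_num) h'
    omega
  omega

-- format's zero padding for a digit-headed (unsigned) string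
theorem zfill_digits (c : Char) (t : List Char) (w : Int) (hc : c = '0' ∨ c = '1') :
    PySem.Chars.zfill (c :: t) w =
      List.replicate (w.toNat - (c :: t).length) '0' ++ (c :: t) := by
  unfold PySem.Chars.zfill
  by_cases hw : w ≤ ((c :: t).length : Int)
  · rw [if_pos hw]
    have : w.toNat - (c :: t).length = 0 := by omega
    rw [this]
    simp
  · rw [if_neg hw]
    have : ¬ (c = '+' ∨ c = '-') := by rcases hc with h | h <;> subst h <;> decide
    simp [this]

theorem printBitvector_neg (width value : Int) (hw : 0 ≤ width) (hv : value < 0) :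
    printBitvector width value = printBitvector_alt width value := by
  unfold printBitvector printBitvector_alt
  rw [if_pos hv, if_pos hv]
  -- the number being complemented
  set m : Nat := (-value).toNat with hmdef
  have hm1 : 1 ≤ m := by omega
  have hmv : -value = (m : Int) := by omega
  -- first format: binary digits of m
  have htb : PySem.Int.toBinChars (-value) = Nat.toDigits 2 m := by
    unfold PySem.Int.toBinChars
    rw [if_neg (by omega)]
  set t := Nat.toDigits 2 m with htdef
  have htne : t ≠ [] := by
    intro h
    have := Nat.length_toDigits_pos (b := 2) (n := m)
    rw [← htdef, h] at this
    simp at this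
  obtain ⟨c, t', hct⟩ := List.exists_cons_of_ne_nil htne
  have hch : c = '0' ∨ c = '1' := by
    apply toDigits2_mem m
    rw [← htdef, hct]
    exact List.mem_cons_self
  -- padded digits
  have hz : fmt0b (-value) width =
      List.replicate (width.toNat - t.length) '0' ++ t := by
    unfold fmt0b
    rw [htb, hct, zfill_digits c t' width hch, ← hct]
  set cs := List.replicate (width.toNat - t.length) '0' ++ t with hcsdef
  -- its length and value
  have hlen : cs.length = max width.toNat t.length := by
    simp [hcsdef]
    omega
  have hbvcs : bv 0 cs = m := by
    unfold bv
    rw [hcsdef, List.foldl_append]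
    have h0 : bv 0 (List.replicate (width.toNat - t.length) '0') = 0 := bv_replicate_zero _
    unfold bv at h0
    rw [h0]
    exact toDigits2_bv m
  -- the flipped string parses to the complement
  set flipped := cs.map (fun l => if l = '1' then '0' else '1') with hfdef
  have hfmem : ∀ ch ∈ flipped, ch = '0' ∨ ch = '1' := by
    intro ch hch'
    rw [hfdef] at hch'
    obtain ⟨x, _, hx⟩ := List.mem_map.mp hch'
    by_cases h1 : x = '1' <;> simp [h1] at hx <;> [exact Or.inl hx.symm; exact Or.inr hx.symm]
  have hfne : flipped ≠ [] := by
    have : cs ≠ [] := by rw [hcsdef, hct]; simp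
    simpa [hfdef]
  have hparse : pyIntBin? flipped = some ((bv 0 flipped : Nat) : Int) := by
    unfold pyIntBin?
    rw [if_neg (by simpa [List.isEmpty_iff] using hfne)]
    rw [parseBin2Go_eq flipped 0 hfmem]
    rfl
  -- arithmetic: parsed value + 1 = 2^L + value
  have hsum : bv 0 flipped + bv 0 cs = 2 ^ cs.length - 1 := by
    rw [hfdef]
    simpa using bv_flip_sum cs
  have hLB : max width (PySem.Int.bitLength (-value)) = (cs.length : Int) := by
    have hbl : PySem.Int.bitLength (-value) = t.length := by
      rw [hmv, htdef, toDigits2_len m hm1]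
    rw [hbl, hlen]
    omega
  have hpow : (0:Nat) < 2 ^ cs.length := Nat.pow_pos (by norm_num)
  have hnum : ((pyIntBin? flipped).getD 0 + 1 : Int) =
      ((1 : Int) <<< (max width (PySem.Int.bitLength (-value))).toNat) + value := by
    rw [hparse]
    simp only [Option.getD_some]
    have hLtn : (max width ((PySem.Int.bitLength (-value) : Nat) : Int)).toNat = cs.length := by
      rw [hLB]
      simp
    rw [Int.shiftLeft_eq, hLtn]
    have hPc : ((2 : Int)) ^ cs.length = ((2 ^ cs.length : Nat) : Int) := by
      push_cast
      ring
    rw [hPc]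
    omega
  simp only [hz, hnum, ← hfdef]

-- ===== VERDICT (by name: the statement is the Claim_ definition above) =====
theorem printBitvector_spec : Claim_equal_printBitvector := by
  intro width value _ hpre
  unfold Spec_printBitvector
  by_cases hv : value < 0
  · exact printBitvector_neg width value hpre hv
  · unfold printBitvector printBitvector_alt
    rw [if_neg hv, if_neg hv]
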